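-- pv_equiv track=rewrite | github.com/Metamess/AdventOfCode | 2018/days/day5.py | collapse_polymer
-- ===== SOURCE A (Python) =====
-- def collapse_polymer(input_polymer, skip_molecule=None):
-- 	while input_polymer[0].lower() == skip_molecule:
-- 		input_polymer = input_polymer[1:]
-- 	result_polymer = [input_polymer[0]]
-- 	input_polymer = input_polymer[1:]
-- 	for i, molecule in enumerate(input_polymer):
-- 		if molecule.lower() == skip_molecule:
-- 			continue
-- 		if len(result_polymer) == 0:
-- 			result_polymer.append(molecule)
-- 			continue
-- 		if result_polymer[-1].isupper():
-- 			if molecule.isupper():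
-- 				# Two uppercase letters in a row, nothing happens
-- 				result_polymer.append(molecule)
-- 				continue
-- 		elif molecule.islower():
-- 			# Two lowercase letters in a row, nothing happens
-- 			result_polymer.append(molecule)
-- 			continue
--
-- 		if result_polymer[-1].upper() != molecule.upper():
-- 			# Two different letters in a row, nothing happens
-- 			result_polymer.append(molecule)
-- 			continue
--
-- 		# The two letters annihilate each other
-- 		result_polymer.pop()
-- 	return len(result_polymer)
-- ===== SOURCE B (Python) =====
-- def collapse_polymer(input_polymer, skip_molecule=None):
--     units = [c for c in input_polymer if c.lower() != skip_molecule]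
--     changed = True
--     while changed:
--         changed = False
--         out = []
--         i = 0
--         n = len(units)
--         while i < n:
--             if i + 1 < n and units[i].swapcase() == units[i + 1]:
--                 i += 2
--                 changed = True
--             else:
--                 out.append(units[i])
--                 i += 1
--         units = out
--     return len(units)
-- ===== Notes on version B (the rewrite author's own statement) =====
-- stated objective: alternative
-- what changed: Replaces A's single-pass last-element stack (append/pop against result_polymer[-1] with A's four-way case branches) by pre-filtering the skipped unit once and then repeatedly scanning the list, deleting every adjacent reacting pair (c.swapcase() == next) per pass until a pass makes no change; confluence of the reduction makes the final length identical.
-- outside the precondition, e.g. on collapse_polymer('aAa', 'a'): A raises IndexError, B returns 0; on collapse_polymer('', None): A raises IndexError, B returns 0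
-- crash fix: On inputs whose every character lowercases to skip_molecule (including the empty string) A's leading while loop runs off the string and raises IndexError; B returns 0, the length of the empty collapsed polymer. — e.g. on collapse_polymer("aAa", some "a"): A raises IndexError, B returns 0
import Mathlib
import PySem

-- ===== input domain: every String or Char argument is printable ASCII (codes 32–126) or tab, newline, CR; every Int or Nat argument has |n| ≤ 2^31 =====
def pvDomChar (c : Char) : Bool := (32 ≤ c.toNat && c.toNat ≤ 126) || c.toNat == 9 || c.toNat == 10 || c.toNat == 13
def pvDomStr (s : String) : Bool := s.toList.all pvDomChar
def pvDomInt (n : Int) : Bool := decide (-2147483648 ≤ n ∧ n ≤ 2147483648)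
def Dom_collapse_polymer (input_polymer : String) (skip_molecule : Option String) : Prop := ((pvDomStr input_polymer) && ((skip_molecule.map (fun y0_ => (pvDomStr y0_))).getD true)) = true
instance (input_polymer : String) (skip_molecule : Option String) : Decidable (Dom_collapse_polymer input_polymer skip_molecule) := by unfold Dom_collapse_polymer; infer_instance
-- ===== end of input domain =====

-- B replaces A's single-pass stack with a repeated-scan pair remover over the pre-filtered unit
-- list (a different, multi-pass algorithm; same cost class, no speed claim); return values proved equal.

-- ===== PORT A =====
-- the leading `while input_polymer[0].lower() == skip_molecule: input_polymer = input_polymer[1:]`;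
-- Python raises IndexError when the list runs out — those inputs are excluded by Pre_ below
def pvStripSkip (skip_molecule : Option String) : List Char → List Char
  | [] => []
  | c :: r =>
    if some (String.mk [PySem.Chars.lowerChar c]) = skip_molecule then pvStripSkip skip_molecule r
    else c :: r

-- one iteration of A's `for` loop body (stack `result_polymer` held head-first: append = cons,
-- [-1] = head, pop = tail); branches in A's order
def pvStepA (skip_molecule : Option String) (stack : List Char) (m : Char) : List Char :=
  if some (String.mk [PySem.Chars.lowerChar m]) = skip_molecule then stack
  else
    match stack with
    | [] => [m]
    | t :: rest =>
      if PySem.Chars.isupper t = true then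
        if PySem.Chars.isupper m = true then m :: t :: rest
        else if PySem.Chars.upperChar t ≠ PySem.Chars.upperChar m then m :: t :: rest
        else rest
      else if PySem.Chars.islower m = true then m :: t :: rest
      else if PySem.Chars.upperChar t ≠ PySem.Chars.upperChar m then m :: t :: rest
      else rest

def collapse_polymer (input_polymer : String) (skip_molecule : Option String) : Int :=
  match pvStripSkip skip_molecule input_polymer.toList with
  | [] => 0   -- Python raises IndexError here (empty after stripping); outside Pre_
  | c :: rest =>
    -- result_polymer = [input_polymer[0]]; for i, molecule in enumerate(rest): … (index i unused)
    ((rest.foldl (pvStepA skip_molecule) [c]).length : Int)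

-- ===== PORT B =====
-- `c.swapcase()` on a single character (exact on the ASCII domain)
def pvSwapcase (c : Char) : Char :=
  if PySem.Chars.islower c = true then PySem.Chars.upperChar c
  else if PySem.Chars.isupper c = true then PySem.Chars.lowerChar c
  else c

-- `c.lower() != skip_molecule`
def pvKeep (skip_molecule : Option String) (c : Char) : Bool :=
  decide (some (String.mk [PySem.Chars.lowerChar c]) ≠ skip_molecule)

-- one pass of B's inner `while i < n` loop: (rebuilt list `out`, `changed` flag)
def pvPassC : List Char → List Char × Bool
  | [] => ([], false)
  | [a] => ([a], false)
  | a :: b :: r =>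
    if pvSwapcase a = b then ((pvPassC r).1, true)
    else ((a :: (pvPassC (b :: r)).1), (pvPassC (b :: r)).2)

-- termination measure for the outer `while changed` loop: a changing pass shrinks the list
theorem pvPassC_length : ∀ l : List Char,
    (pvPassC l).1.length ≤ l.length ∧ ((pvPassC l).2 = true → (pvPassC l).1.length < l.length) := by
  intro l
  induction l using pvPassC.induct with
  | case1 => simp [pvPassC]
  | case2 a => simp [pvPassC]
  | case3 a r ih =>
    have e : pvPassC (a :: pvSwapcase a :: r) = ((pvPassC r).1, true) := by
      simp [pvPassC]
    rw [e]
    have := ih.1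
    constructor
    · simp only [List.length_cons]; omega
    · intro _; simp only [List.length_cons]; omega
  | case4 a b r h ih =>
    simp only [pvPassC, if_neg h]
    have h1 := ih.1
    simp only [List.length_cons] at h1 ⊢
    exact ⟨by omega, fun hc => by have := ih.2 hc; simp only [List.length_cons] at this; omega⟩

-- B's outer `while changed` loop
def pvLoopB (l : List Char) : List Char :=
  if h : (pvPassC l).2 = true then pvLoopB (pvPassC l).1 else (pvPassC l).1
termination_by l.length
decreasing_by exact (pvPassC_length l).2 h

def collapse_polymer_alt (input_polymer : String) (skip_molecule : Option String) : Int :=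
  ((pvLoopB (input_polymer.toList.filter (pvKeep skip_molecule))).length : Int)

-- ===== PRECONDITION & SPEC =====
-- Pre_ excludes exactly the inputs on which A raises IndexError: strings whose every character
-- lowercases to skip_molecule (in particular the empty string), so that the leading while loop
-- runs off the end of the string.
def Pre_collapse_polymer (input_polymer : String) (skip_molecule : Option String) : Prop :=
  input_polymer.toList.any
    (fun c => decide (some (String.mk [PySem.Chars.lowerChar c]) ≠ skip_molecule)) = true
instance (input_polymer : String) (skip_molecule : Option String) : Decidable (Pre_collapse_polymer input_polymer skip_molecule) := by unfold Pre_collapse_polymer; infer_instance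

def pvWitness_collapse_polymer : String × Option String := ("dabAcCaCBAcCcaDA", some "b")

-- On inputs where every character lowercases to skip_molecule (e.g. the empty string) A raises
-- IndexError while B naturally returns 0, the length of the empty collapsed polymer.
def Raises_collapse_polymer (input_polymer : String) (skip_molecule : Option String) : Prop :=
  input_polymer.toList.all
    (fun c => decide (some (String.mk [PySem.Chars.lowerChar c]) = skip_molecule)) = true
instance (input_polymer : String) (skip_molecule : Option String) : Decidable (Raises_collapse_polymer input_polymer skip_molecule) := by unfold Raises_collapse_polymer; infer_instance

def pvRaiseWitness_collapse_polymer : String × Option String := ("aAa", some "a")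
def pvRaiseWitnessOut_collapse_polymer : Int := 0

def Spec_collapse_polymer (input_polymer : String) (skip_molecule : Option String) (out : Int) : Prop := out = collapse_polymer_alt input_polymer skip_molecule
instance (input_polymer : String) (skip_molecule : Option String) (out : Int) : Decidable (Spec_collapse_polymer input_polymer skip_molecule out) := by unfold Spec_collapse_polymer; infer_instance

-- ===== CLAIM (what is proved, stated in full; the proofs are below) =====
def Claim_equal_collapse_polymer : Prop := ∀ (input_polymer : String) (skip_molecule : Option String), Dom_collapse_polymer input_polymer skip_molecule → Pre_collapse_polymer input_polymer skip_molecule → Spec_collapse_polymer input_polymer skip_molecule (collapse_polymer input_polymer skip_molecule)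

def Claim_raises_collapse_polymer : Prop := (∀ (input_polymer : String) (skip_molecule : Option String), Dom_collapse_polymer input_polymer skip_molecule → Raises_collapse_polymer input_polymer skip_molecule → ¬ Pre_collapse_polymer input_polymer skip_molecule) ∧ (Dom_collapse_polymer (pvRaiseWitness_collapse_polymer.1) (pvRaiseWitness_collapse_polymer.2) ∧ Raises_collapse_polymer (pvRaiseWitness_collapse_polymer.1) (pvRaiseWitness_collapse_polymer.2) ∧ collapse_polymer_alt (pvRaiseWitness_collapse_polymer.1) (pvRaiseWitness_collapse_polymer.2) = pvRaiseWitnessOut_collapse_polymer)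

-- ===== LEMMAS AND PROOFS =====

-- character-level facts
theorem pvIsupper_iff (c : Char) : PySem.Chars.isupper c = true ↔ 65 ≤ c.toNat ∧ c.toNat ≤ 90 := by
  simp only [PySem.Chars.isupper, Bool.and_eq_true, decide_eq_true_eq, Char.le_def,
    UInt32.le_iff_toNat_le, Char.toNat_val, show 'A'.toNat = 65 from rfl, show 'Z'.toNat = 90 from rfl]

theorem pvIslower_iff (c : Char) : PySem.Chars.islower c = true ↔ 97 ≤ c.toNat ∧ c.toNat ≤ 122 := by
  simp only [PySem.Chars.islower, Bool.and_eq_true, decide_eq_true_eq, Char.le_def,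
    UInt32.le_iff_toNat_le, Char.toNat_val, show 'a'.toNat = 97 from rfl, show 'z'.toNat = 122 from rfl]

theorem pvToNat_inj {a b : Char} (h : a.toNat = b.toNat) : a = b :=
  Char.ext (UInt32.toNat_inj.1 h)

theorem pvToNat_lowerChar {c : Char} (h : PySem.Chars.isupper c = true) :
    (PySem.Chars.lowerChar c).toNat = c.toNat + 32 := by
  have h' := (pvIsupper_iff c).1 h
  have hv : (c.toNat + 32).isValidChar := by left; omega
  simp [PySem.Chars.lowerChar, h, Char.toNat_ofNat, hv]

theorem pvToNat_upperChar {c : Char} (h : PySem.Chars.islower c = true) :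
    (PySem.Chars.upperChar c).toNat = c.toNat - 32 := by
  have h' := (pvIslower_iff c).1 h
  have hv : (c.toNat - 32).isValidChar := by left; omega
  simp [PySem.Chars.upperChar, h, Char.toNat_ofNat, hv]

theorem pvUpperChar_id {c : Char} (h : PySem.Chars.islower c = false) :
    PySem.Chars.upperChar c = c := by
  simp [PySem.Chars.upperChar, h]

theorem pvNotUpper_of_lower {c : Char} (h : PySem.Chars.islower c = true) :
    PySem.Chars.isupper c = false := by
  have := (pvIslower_iff c).1 h
  by_contra hc
  have := (pvIsupper_iff c).1 (by simpa using hc)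
  omega

theorem pvNotLower_of_upper {c : Char} (h : PySem.Chars.isupper c = true) :
    PySem.Chars.islower c = false := by
  have := (pvIsupper_iff c).1 h
  by_contra hc
  have := (pvIslower_iff c).1 (by simpa using hc)
  omega

theorem pvUpper_upperChar {c : Char} (h : PySem.Chars.islower c = true) :
    PySem.Chars.isupper (PySem.Chars.upperChar c) = true := by
  have := (pvIslower_iff c).1 h
  rw [pvIsupper_iff, pvToNat_upperChar h]
  omega

theorem pvLower_lowerChar {c : Char} (h : PySem.Chars.isupper c = true) :
    PySem.Chars.islower (PySem.Chars.lowerChar c) = true := by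
  have := (pvIsupper_iff c).1 h
  rw [pvIslower_iff, pvToNat_lowerChar h]
  omega

theorem pvSwap_invol (c : Char) : pvSwapcase (pvSwapcase c) = c := by
  by_cases hl : PySem.Chars.islower c = true
  · have hcn := (pvIslower_iff c).1 hl
    have h1 : pvSwapcase c = PySem.Chars.upperChar c := by simp [pvSwapcase, hl]
    have h2 : PySem.Chars.isupper (PySem.Chars.upperChar c) = true := pvUpper_upperChar hl
    rw [h1]
    have h3 : pvSwapcase (PySem.Chars.upperChar c)
        = PySem.Chars.lowerChar (PySem.Chars.upperChar c) := by
      simp [pvSwapcase, pvNotLower_of_upper h2, h2]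
    rw [h3]
    apply pvToNat_inj
    rw [pvToNat_lowerChar h2, pvToNat_upperChar hl]
    omega
  · by_cases hu : PySem.Chars.isupper c = true
    · have hcn := (pvIsupper_iff c).1 hu
      have h1 : pvSwapcase c = PySem.Chars.lowerChar c := by
        simp [pvSwapcase, hl, hu]
      have h2 : PySem.Chars.islower (PySem.Chars.lowerChar c) = true := pvLower_lowerChar hu
      rw [h1]
      have h3 : pvSwapcase (PySem.Chars.lowerChar c)
          = PySem.Chars.upperChar (PySem.Chars.lowerChar c) := by
        simp [pvSwapcase, h2]
      rw [h3]
      apply pvToNat_inj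
      rw [pvToNat_upperChar h2, pvToNat_lowerChar hu]
      omega
    · simp [pvSwapcase, hl, hu]

theorem pvSwap_symm {a b : Char} (h : pvSwapcase a = b) : pvSwapcase b = a := by
  rw [← h, pvSwap_invol]

theorem pvSwap_trans {t a b : Char} (h1 : pvSwapcase t = a) (h2 : pvSwapcase a = b) : t = b := by
  rw [← h2, ← h1, pvSwap_invol]

-- A's annihilation condition coincides with `swapcase`
theorem pvPop_iff (t m : Char) :
    pvSwapcase t = m ↔
      (PySem.Chars.upperChar t = PySem.Chars.upperChar m ∧
       ¬(PySem.Chars.isupper t = true ∧ PySem.Chars.isupper m = true) ∧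
       ¬(PySem.Chars.isupper t = false ∧ PySem.Chars.islower m = true)) := by
  by_cases hlt : PySem.Chars.islower t = true
  · have hut : PySem.Chars.isupper t = false := pvNotUpper_of_lower hlt
    have hswap : pvSwapcase t = PySem.Chars.upperChar t := by simp [pvSwapcase, hlt]
    rw [hswap]
    constructor
    · rintro rfl
      have hum := pvUpper_upperChar hlt
      refine ⟨(pvUpperChar_id (pvNotLower_of_upper hum)).symm, ?_, ?_⟩
      · rintro ⟨h1, _⟩; simp [hut] at h1
      · rintro ⟨_, h2⟩; simp [pvNotLower_of_upper hum] at h2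
    · rintro ⟨h1, _, h3⟩
      have hlm : PySem.Chars.islower m = false := by
        by_contra hc
        exact h3 ⟨hut, by simpa using hc⟩
      rw [pvUpperChar_id hlm] at h1
      exact h1
  · by_cases hut : PySem.Chars.isupper t = true
    · have hswap : pvSwapcase t = PySem.Chars.lowerChar t := by
        simp [pvSwapcase, hlt, hut]
      have hid : PySem.Chars.upperChar t = t := pvUpperChar_id (by simpa using hlt)
      rw [hswap]
      constructor
      · rintro rfl
        have hlm := pvLower_lowerChar hut
        refine ⟨?_, ?_, ?_⟩
        · apply pvToNat_inj
          rw [hid, pvToNat_upperChar hlm, pvToNat_lowerChar hut]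
          have := (pvIsupper_iff t).1 hut
          omega
        · rintro ⟨_, h2⟩; simp [pvNotUpper_of_lower hlm] at h2
        · rintro ⟨h1, _⟩; simp [hut] at h1
      · rintro ⟨h1, h2, _⟩
        have hum : PySem.Chars.isupper m = false := by
          by_contra hc
          exact h2 ⟨hut, by simpa using hc⟩
        rw [hid] at h1
        by_cases hlm : PySem.Chars.islower m = true
        · apply pvToNat_inj
          rw [pvToNat_lowerChar hut]
          have ht := (pvIsupper_iff t).1 hut
          have hm := (pvIslower_iff m).1 hlm
          have := congrArg Char.toNat h1
          rw [pvToNat_upperChar hlm] at this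
          omega
        · rw [pvUpperChar_id (by simpa using hlm)] at h1
          rw [← h1] at hum
          simp [hut] at hum
    · have hswap : pvSwapcase t = t := by simp [pvSwapcase, hlt, hut]
      have hid : PySem.Chars.upperChar t = t := pvUpperChar_id (by simpa using hlt)
      rw [hswap]
      constructor
      · rintro rfl
        exact ⟨rfl, by rintro ⟨h1, _⟩; simp [hut] at h1,
               by rintro ⟨_, h2⟩; simp [hlt] at h2⟩
      · rintro ⟨h1, _, h3⟩
        have hlm : PySem.Chars.islower m = false := by
          by_contra hc
          exact h3 ⟨by simpa using hut, by simpa using hc⟩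
        rw [hid, pvUpperChar_id hlm] at h1
        exact h1

-- the head-form of A's loop body on kept characters
def pvStepS (s : List Char) (m : Char) : List Char :=
  match s with
  | [] => [m]
  | t :: r => if pvSwapcase t = m then r else m :: t :: r

theorem pvStepA_eq (skip : Option String) (s : List Char) (m : Char) :
    pvStepA skip s m =
      if pvKeep skip m = true then pvStepS s m else s := by
  by_cases hk : some (String.mk [PySem.Chars.lowerChar m]) = skip
  · simp [pvStepA, pvKeep, hk]
  · cases s with
    | nil => simp [pvStepA, pvKeep, hk, pvStepS]
    | cons t r =>
      simp only [pvStepA, if_neg hk, pvKeep, decide_eq_true_eq, ne_eq, hk, not_false_eq_true,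
        if_pos, pvStepS]
      by_cases hp : pvSwapcase t = m
      · obtain ⟨h1, h2, h3⟩ := (pvPop_iff t m).1 hp
        by_cases hut : PySem.Chars.isupper t = true
        · have hum : PySem.Chars.isupper m ≠ true := fun hc => h2 ⟨hut, hc⟩
          simp [hut, hum, h1, hp]
        · have hlm : PySem.Chars.islower m ≠ true := fun hc =>
            h3 ⟨by simpa using hut, hc⟩
          simp [hut, hlm, h1, hp]
      · have hnp := (pvPop_iff t m).not.1 hp
        push Not at hnp
        by_cases hut : PySem.Chars.isupper t = true
        · by_cases hum : PySem.Chars.isupper m = true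
          · simp [hut, hum, hp]
          · by_cases hne : PySem.Chars.upperChar t = PySem.Chars.upperChar m
            · exact absurd (hnp hne) (by simp [hut, hum])
            · simp [hut, hum, hne, hp]
        · by_cases hlm : PySem.Chars.islower m = true
          · simp [hut, hlm, hp]
          · by_cases hne : PySem.Chars.upperChar t = PySem.Chars.upperChar m
            · exact absurd (hnp hne) (by simp [hut, hlm])
            · simp [hut, hlm, hne, hp]

-- the stack invariant: no two adjacent stack entries react
def pvInv (s : List Char) : Prop := List.IsChain (fun a b => pvSwapcase a ≠ b) s

theorem pvInv_step {s : List Char} (m : Char) (h : pvInv s) : pvInv (pvStepS s m) := by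
  cases s with
  | nil => simp [pvStepS, pvInv]
  | cons t r =>
    by_cases hp : pvSwapcase t = m
    · simpa [pvStepS, hp, pvInv] using h.tail
    · have hmt : pvSwapcase m ≠ t := fun hc => hp (pvSwap_symm hc)
      simpa [pvStepS, hp, pvInv, List.isChain_cons_cons] using ⟨hmt, h⟩

theorem pvDelete {s : List Char} {a b : Char} (hs : pvInv s) (hab : pvSwapcase a = b)
    (ys : List Char) :
    List.foldl pvStepS s (a :: b :: ys) = List.foldl pvStepS s ys := by
  cases s with
  | nil => simp [List.foldl, pvStepS, hab]
  | cons t r =>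
    by_cases hta : pvSwapcase t = a
    · have htb : t = b := pvSwap_trans hta hab
      subst htb
      simp only [List.foldl, pvStepS, if_pos hta]
      cases r with
      | nil => rfl
      | cons u q =>
        have htu : pvSwapcase t ≠ u := (List.isChain_cons_cons.1 hs).1
        have hut : pvSwapcase u ≠ t := fun hc => htu (pvSwap_symm hc)
        simp [pvStepS, hut]
    · simp [List.foldl, pvStepS, hta, hab]

theorem pvPass_fold : ∀ l s, pvInv s →
    List.foldl pvStepS s (pvPassC l).1 = List.foldl pvStepS s l := by
  intro l
  induction l using pvPassC.induct with
  | case1 => intro s _; simp [pvPassC]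
  | case2 a => intro s _; simp [pvPassC]
  | case3 a r ih =>
    intro s hs
    have e : pvPassC (a :: pvSwapcase a :: r) = ((pvPassC r).1, true) := by
      simp [pvPassC]
    rw [e]
    rw [ih s hs, pvDelete hs rfl]
  | case4 a b r h ih =>
    intro s hs
    rw [pvPassC, if_neg h]
    show List.foldl pvStepS (pvStepS s a) (pvPassC (b :: r)).1
        = List.foldl pvStepS s (a :: b :: r)
    rw [ih (pvStepS s a) (pvInv_step a hs)]
    rfl

theorem pvPassC_fixed : ∀ l : List Char, (pvPassC l).2 = false →
    (pvPassC l).1 = l ∧ List.IsChain (fun a b => pvSwapcase a ≠ b) l := by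
  intro l
  induction l using pvPassC.induct with
  | case1 => simp [pvPassC]
  | case2 a => simp [pvPassC]
  | case3 a r ih => simp [pvPassC]
  | case4 a b r h ih =>
    intro hc
    rw [pvPassC, if_neg h] at hc ⊢
    simp only at hc
    obtain ⟨h1, h2⟩ := ih hc
    exact ⟨by simp [h1], List.isChain_cons_cons.2 ⟨h, h2⟩⟩

theorem pvScan_noredex : ∀ l s, pvInv s →
    List.IsChain (fun a b => pvSwapcase a ≠ b) l →
    (∀ t r h q, s = t :: r → l = h :: q → pvSwapcase t ≠ h) →
    List.foldl pvStepS s l = l.reverse ++ s := by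
  intro l
  induction l with
  | nil => intro s _ _ _; simp
  | cons h q ih =>
    intro s hs hl hguard
    have hstep : pvStepS s h = h :: s := by
      cases s with
      | nil => rfl
      | cons t r =>
        have := hguard t r h q rfl rfl
        simp [pvStepS, this]
    have hinv : pvInv (h :: s) := by
      cases s with
      | nil => simp [pvInv]
      | cons t r =>
        have hth := hguard t r h q rfl rfl
        have hht : pvSwapcase h ≠ t := fun hc => hth (pvSwap_symm hc)
        exact List.isChain_cons_cons.2 ⟨hht, hs⟩
    have hq : List.IsChain (fun a b => pvSwapcase a ≠ b) q := hl.tail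
    have hguard' : ∀ t r h' q', h :: s = t :: r → q = h' :: q' → pvSwapcase t ≠ h' := by
      intro t r h' q' he1 he2
      cases he1
      subst he2
      exact (List.isChain_cons_cons.1 hl).1
    calc List.foldl pvStepS s (h :: q) = List.foldl pvStepS (h :: s) q := by
          simp [List.foldl, hstep]
      _ = q.reverse ++ (h :: s) := ih (h :: s) hinv hq hguard'
      _ = (h :: q).reverse ++ s := by simp

theorem pvLoop_spec : ∀ l : List Char,
    List.foldl pvStepS [] l = (pvLoopB l).reverse := by
  intro l
  induction l using pvLoopB.induct with
  | case1 l h ih =>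
    rw [pvLoopB, dif_pos h, ← ih, ← pvPass_fold l [] (by simp [pvInv])]
  | case2 l h =>
    have h' : (pvPassC l).2 = false := by simpa using h
    obtain ⟨h1, h2⟩ := pvPassC_fixed l h'
    rw [pvLoopB, dif_neg h, h1]
    have := pvScan_noredex l [] (by simp [pvInv]) h2 (by intro t r h q hc; simp at hc)
    simpa using this

theorem pvFoldA_filter (skip : Option String) : ∀ (l : List Char) (s : List Char),
    List.foldl (pvStepA skip) s l = List.foldl pvStepS s (l.filter (pvKeep skip)) := by
  intro l
  induction l with
  | nil => intro s; rfl
  | cons c r ih =>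
    intro s
    by_cases hk : pvKeep skip c = true
    · simp [List.foldl, List.filter_cons, hk, pvStepA_eq, ih]
    · simp [List.foldl, List.filter_cons, hk, pvStepA_eq, ih]

theorem pvStrip_filter (skip : Option String) : ∀ l : List Char,
    (pvStripSkip skip l).filter (pvKeep skip) = l.filter (pvKeep skip) := by
  intro l
  induction l with
  | nil => rfl
  | cons c r ih =>
    by_cases hk : some (String.mk [PySem.Chars.lowerChar c]) = skip
    · have : pvKeep skip c = false := by simp [pvKeep, hk]
      simp [pvStripSkip, hk, List.filter_cons, this, ih]
    · simp [pvStripSkip, hk]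

theorem pvStrip_head_keep (skip : Option String) : ∀ (l : List Char) (c : Char) (rest : List Char),
    pvStripSkip skip l = c :: rest → pvKeep skip c = true := by
  intro l
  induction l with
  | nil => intro c rest h; simp [pvStripSkip] at h
  | cons d r ih =>
    intro c rest h
    by_cases hk : some (String.mk [PySem.Chars.lowerChar d]) = skip
    · rw [pvStripSkip, if_pos hk] at h
      exact ih c rest h
    · rw [pvStripSkip, if_neg hk] at h
      cases h
      simp [pvKeep, hk]

theorem pvStrip_ne_nil (skip : Option String) : ∀ l : List Char,
    (∃ c ∈ l, some (String.mk [PySem.Chars.lowerChar c]) ≠ skip) →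
    pvStripSkip skip l ≠ [] := by
  intro l
  induction l with
  | nil => rintro ⟨c, hc, _⟩; simp at hc
  | cons d r ih =>
    rintro ⟨c, hc, hne⟩
    by_cases hk : some (String.mk [PySem.Chars.lowerChar d]) = skip
    · rw [pvStripSkip, if_pos hk]
      apply ih
      refine ⟨c, ?_, hne⟩
      rcases List.mem_cons.1 hc with rfl | hmem
      · exact absurd hk hne
      · exact hmem
    · rw [pvStripSkip, if_neg hk]
      simp

-- ===== VERDICT (by name: the statement is the Claim_ definition above) =====
theorem collapse_polymer_spec : Claim_equal_collapse_polymer := by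
  intro ip skip _hdom hpre
  unfold Spec_collapse_polymer collapse_polymer collapse_polymer_alt
  unfold Pre_collapse_polymer at hpre
  rw [List.any_eq_true] at hpre
  obtain ⟨c0, hc0, hne0⟩ := hpre
  have hne := pvStrip_ne_nil skip ip.toList ⟨c0, hc0, by simpa using hne0⟩
  cases heq : pvStripSkip skip ip.toList with
  | nil => exact absurd heq hne
  | cons c rest =>
    simp only
    have hkc : pvKeep skip c = true := pvStrip_head_keep skip ip.toList c rest heq
    have h1 : List.foldl (pvStepA skip) [c] rest
        = List.foldl pvStepS [] (ip.toList.filter (pvKeep skip)) := by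
      rw [pvFoldA_filter skip rest [c]]
      have h2 : (c :: rest).filter (pvKeep skip) = c :: rest.filter (pvKeep skip) := by
        simp [List.filter_cons, hkc]
      have h3 : List.foldl pvStepS [] ((c :: rest).filter (pvKeep skip))
          = List.foldl pvStepS [c] (rest.filter (pvKeep skip)) := by
        rw [h2]; rfl
      rw [← h3, ← heq, pvStrip_filter]
    rw [h1, pvLoop_spec]
    simp

@[simp]
theorem collapse_polymer_raises : Claim_raises_collapse_polymer := by
  unfold Claim_raises_collapse_polymer
  constructor
  · intro ip skip _hdom hr hpre
    unfold Raises_collapse_polymer at hr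
    unfold Pre_collapse_polymer at hpre
    rw [List.all_eq_true] at hr
    rw [List.any_eq_true] at hpre
    obtain ⟨c, hc, hne⟩ := hpre
    have := hr c hc
    simp_all
  · refine ⟨by decide, by decide, ?_⟩
    show collapse_polymer_alt "aAa" (some "a") = 0
    unfold collapse_polymer_alt
    have h1 : ("aAa".toList.filter (pvKeep (some "a"))) = [] := by decide
    have h2 : pvLoopB [] = [] := by rw [pvLoopB.eq_def]; simp [pvPassC]
    rw [h1, h2]
    rfl
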